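-- pv_equiv track=rewrite | github.com/JIACHENG135/LeetcodeForFun | Intuit-Karat.py | parent2
-- ===== SOURCE A (Python) =====
-- import collections
--
-- def parent2(edges,s,e):
-- 	g = collections.defaultdict(set)
-- 	for u,v in edges:
-- 		g[v].add(u)
--
-- 	s1,s2 = set(),set()
-- 	q = collections.deque([s])
-- 	while q:
-- 		cur = q.popleft()
-- 		s1.add(cur)
-- 		for nei in g[cur]:
-- 			if nei not in s1:
-- 				q.append(nei)
-- 	q = collections.deque([e])
-- 	while q:
-- 		cur = q.popleft()
-- 		s2.add(cur)
-- 		for nei in g[cur]: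
-- 			if nei not in s2:
-- 				q.append(nei)
-- 	return len(s1.intersection(s2)) != 0
-- ===== SOURCE B (Python) =====
-- def parent2(edges, s, e):
--     # Edge-list fixpoint closure: grow each ancestor set by sweeping the edge
--     # list until no sweep adds a node; no reverse-adjacency dict, no queue.
--     def ancestors(root):
--         anc = {root}
--         changed = True
--         while changed:
--             changed = False
--             for u, v in edges:
--                 if v in anc and u not in anc:
--                     anc.add(u)
--                     changed = True
--         return anc
--     return not ancestors(s).isdisjoint(ancestors(e))
-- ===== Notes on version B (the rewrite author's own statement) =====
-- stated objective: alternative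
-- what changed: A builds a reverse-adjacency dict and runs two queue-based BFS traversals to collect each node's ancestor set; B never builds a graph structure: it grows each ancestor set by repeatedly sweeping the raw edge list until a sweep adds nothing (a fixpoint computation), then tests the two sets for disjointness.
import Mathlib
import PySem

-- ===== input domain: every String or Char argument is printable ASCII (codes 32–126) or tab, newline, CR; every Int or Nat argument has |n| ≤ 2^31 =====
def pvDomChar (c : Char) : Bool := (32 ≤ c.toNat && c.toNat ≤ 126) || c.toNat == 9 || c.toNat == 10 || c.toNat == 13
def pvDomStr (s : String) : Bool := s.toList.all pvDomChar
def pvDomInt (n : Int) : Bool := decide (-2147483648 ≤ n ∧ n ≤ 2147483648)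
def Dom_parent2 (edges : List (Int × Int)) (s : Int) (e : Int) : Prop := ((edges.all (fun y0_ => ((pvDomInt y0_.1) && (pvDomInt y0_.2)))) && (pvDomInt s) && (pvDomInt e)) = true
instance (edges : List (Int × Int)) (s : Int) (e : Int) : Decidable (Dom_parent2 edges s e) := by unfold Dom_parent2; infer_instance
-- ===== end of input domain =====

-- B replaces A's reverse-adjacency dict + two BFS queue traversals by repeated
-- fixpoint sweeps over the raw edge list (objective: alternative algorithm, not faster).

-- ===== PORT A =====
-- g = defaultdict(set); for u,v in edges: g[v].add(u)
def pvBuildG (edges : List (Int × Int)) : PySem.Dict Int (PySem.Set Int) :=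
  edges.foldl
    (fun g uv => g.insert uv.2 (PySem.Set.add (g.getD uv.2 PySem.Set.empty) uv.1))
    PySem.Dict.empty

-- universe of nodes a BFS state can ever touch (termination measure only)
def pvBfsUniv (g : PySem.Dict Int (PySem.Set Int)) (s1 : PySem.Set Int) (q : List Int) :
    Finset Int :=
  (s1 ++ q ++ (PySem.Dict.values g).flatten).toFinset

lemma pv_mem_values_flatten_of_mem_getD (g : PySem.Dict Int (PySem.Set Int)) (k x : Int)
    (h : x ∈ PySem.Dict.getD g k PySem.Set.empty) :
    x ∈ (PySem.Dict.values g).flatten := by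
  cases hg : PySem.Dict.get? g k with
  | none =>
      rw [PySem.Dict.getD_of_get?_eq_none g PySem.Set.empty hg] at h
      simp [PySem.Set.empty] at h
  | some v =>
      rw [PySem.Dict.getD_of_get?_eq_some g PySem.Set.empty hg] at h
      have hv : (k, v) ∈ g.items := PySem.Dict.mem_items_of_get?_eq_some g hg
      have hvv : v ∈ PySem.Dict.values g := by
        simp only [PySem.Dict.values]
        exact List.mem_map_of_mem hv
      exact List.mem_flatten.mpr ⟨v, hvv, h⟩

lemma pvBfsUniv_step (g : PySem.Dict Int (PySem.Set Int)) (s1 : PySem.Set Int)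
    (cur : Int) (rest : List Int) :
    pvBfsUniv g (PySem.Set.add s1 cur)
      (rest ++ (PySem.Dict.getD g cur PySem.Set.empty).filter
        (fun nei => !(PySem.Set.contains (PySem.Set.add s1 cur) nei)))
      = pvBfsUniv g s1 (cur :: rest) := by
  ext y
  have hv := pv_mem_values_flatten_of_mem_getD g cur y
  simp only [pvBfsUniv, List.mem_toFinset, List.mem_append, PySem.Set.mem_add,
    List.mem_filter, List.mem_cons]
  tauto

lemma pvBfs_dec_new (g : PySem.Dict Int (PySem.Set Int)) (s1 : PySem.Set Int)
    (cur : Int) (rest : List Int) (h : cur ∉ s1) :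
    ((pvBfsUniv g (PySem.Set.add s1 cur)
        (rest ++ (PySem.Dict.getD g cur PySem.Set.empty).filter
          (fun nei => !(PySem.Set.contains (PySem.Set.add s1 cur) nei)))) \
      (PySem.Set.add s1 cur).toFinset).card
    < ((pvBfsUniv g s1 (cur :: rest)) \ s1.toFinset).card := by
  rw [pvBfsUniv_step]
  have hadd : (PySem.Set.add s1 cur).toFinset = insert cur s1.toFinset := by
    ext z
    simp [PySem.Set.add_of_not_mem h]
  rw [hadd]
  apply Finset.card_lt_card
  rw [Finset.ssubset_iff_of_subset
    (Finset.sdiff_subset_sdiff (Finset.Subset.refl _) (Finset.subset_insert _ _))]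
  refine ⟨cur, ?_, ?_⟩
  · rw [Finset.mem_sdiff, List.mem_toFinset]
    exact ⟨by simp [pvBfsUniv], h⟩
  · rw [Finset.mem_sdiff]
    push Not
    intro _
    exact Finset.mem_insert_self cur _

lemma pvBfs_dec_old (g : PySem.Dict Int (PySem.Set Int)) (s1 : PySem.Set Int)
    (cur : Int) (rest : List Int) (h : cur ∈ s1) :
    ((pvBfsUniv g (PySem.Set.add s1 cur)
        (rest ++ (PySem.Dict.getD g cur PySem.Set.empty).filter
          (fun nei => !(PySem.Set.contains (PySem.Set.add s1 cur) nei)))) \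
      (PySem.Set.add s1 cur).toFinset).card
    = ((pvBfsUniv g s1 (cur :: rest)) \ s1.toFinset).card
    ∧ ((rest ++ (PySem.Dict.getD g cur PySem.Set.empty).filter
          (fun nei => !(PySem.Set.contains (PySem.Set.add s1 cur) nei))).filter
        (fun x => PySem.Set.contains (PySem.Set.add s1 cur) x)).length
      < ((cur :: rest).filter (fun x => PySem.Set.contains s1 x)).length := by
  have hc : PySem.Set.contains s1 cur = true := (PySem.Set.contains_iff _ _).mpr h
  constructor
  · rw [pvBfsUniv_step, PySem.Set.add_of_mem h]
  · rw [PySem.Set.add_of_mem h, List.filter_append]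
    have happ : ((PySem.Dict.getD g cur PySem.Set.empty).filter
        (fun nei => !(PySem.Set.contains s1 nei))).filter
          (fun x => PySem.Set.contains s1 x) = [] := by
      apply List.filter_eq_nil_iff.mpr
      intro a ha
      have h2 := (List.mem_filter.mp ha).2
      simp only [Bool.not_eq_true'] at h2
      intro hcontra
      simp only [h2] at hcontra
      cases hcontra
    rw [happ, List.append_nil, List.filter_cons, if_pos hc]
    simp

-- while q: cur = q.popleft(); s1.add(cur); for nei in g[cur]: if nei not in s1: q.append(nei)
def pvBfs (g : PySem.Dict Int (PySem.Set Int)) (s1 : PySem.Set Int) (q : List Int) :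
    PySem.Set Int :=
  match q with
  | [] => s1
  | cur :: rest =>
      pvBfs g (PySem.Set.add s1 cur)
        (rest ++ (PySem.Dict.getD g cur PySem.Set.empty).filter
          (fun nei => !(PySem.Set.contains (PySem.Set.add s1 cur) nei)))
termination_by
  (((pvBfsUniv g s1 q) \ s1.toFinset).card,
   (q.filter (fun x => PySem.Set.contains s1 x)).length)
decreasing_by
  by_cases h : cur ∈ s1
  · have hd := pvBfs_dec_old g s1 cur rest h
    exact Prod.Lex.right' _ (le_of_eq hd.1) hd.2
  · exact Prod.Lex.left _ _ (pvBfs_dec_new g s1 cur rest h)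

def parent2 (edges : List (Int × Int)) (s : Int) (e : Int) : Bool :=
  let g := pvBuildG edges
  let s1 := pvBfs g PySem.Set.empty [s]
  let s2 := pvBfs g PySem.Set.empty [e]
  PySem.Set.len (PySem.Set.inter s1 s2) != 0

-- ===== PORT B =====
-- body of the sweep: if v in anc and u not in anc: anc.add(u); changed = True
def pvAncF (p : PySem.Set Int × Bool) (uv : Int × Int) : PySem.Set Int × Bool :=
  if PySem.Set.contains p.1 uv.2 && !(PySem.Set.contains p.1 uv.1)
  then (PySem.Set.add p.1 uv.1, true) else p

-- one pass of 'changed = False; for u, v in edges: …' : returns (new anc, changed)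
def pvSweep (edges : List (Int × Int)) (anc : PySem.Set Int) : PySem.Set Int × Bool :=
  edges.foldl pvAncF (anc, false)

lemma pvSweep_grow : ∀ (l : List (Int × Int)) (p : PySem.Set Int × Bool),
    (∀ x ∈ p.1, x ∈ (l.foldl pvAncF p).1)
    ∧ (∀ x ∈ (l.foldl pvAncF p).1, x ∈ p.1 ∨ x ∈ l.map (·.1))
    ∧ (p.2 = false → (l.foldl pvAncF p).2 = true →
        ∃ x, x ∈ (l.foldl pvAncF p).1 ∧ x ∉ p.1) := by
  intro l
  induction l with
  | nil =>
      intro p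
      refine ⟨fun x hx => hx, fun x hx => Or.inl hx, ?_⟩
      intro h1 h2
      simp only [List.foldl_nil] at h2
      rw [h1] at h2
      cases h2
  | cons uv t ih =>
      intro p
      rcases ih (pvAncF p uv) with ⟨ih1, ih2, ih3⟩
      simp only [List.foldl_cons, List.map_cons, List.mem_cons]
      by_cases hc : (PySem.Set.contains p.1 uv.2 && !(PySem.Set.contains p.1 uv.1)) = true
      · have hq : pvAncF p uv = (PySem.Set.add p.1 uv.1, true) := by
          simp only [pvAncF]; rw [if_pos hc]
        rw [hq] at ih1 ih2 ih3 ⊢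
        have hu : uv.1 ∉ p.1 := by
          have hc2 := hc
          rw [Bool.and_eq_true, Bool.not_eq_true'] at hc2
          intro hmem
          rw [(PySem.Set.contains_iff _ _).mpr hmem] at hc2
          cases hc2.2
        refine ⟨?_, ?_, ?_⟩
        · intro x hx
          exact ih1 x ((PySem.Set.mem_add _ _ _).mpr (Or.inl hx))
        · intro x hx
          rcases ih2 x hx with hx' | hx'
          · rcases (PySem.Set.mem_add _ _ _).mp hx' with h | h
            · exact Or.inl h
            · exact Or.inr (Or.inl h)
          · exact Or.inr (Or.inr hx')
        · intro _ _
          exact ⟨uv.1, ih1 uv.1 ((PySem.Set.mem_add _ _ _).mpr (Or.inr rfl)), hu⟩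
      · have hq : pvAncF p uv = p := by
          simp only [pvAncF]; rw [if_neg hc]
        rw [hq] at ih1 ih2 ih3 ⊢
        refine ⟨ih1, ?_, ih3⟩
        intro x hx
        rcases ih2 x hx with h | h
        · exact Or.inl h
        · exact Or.inr (Or.inr h)

lemma pvSweep_dec (edges : List (Int × Int)) (anc : PySem.Set Int)
    (h : (pvSweep edges anc).2 = true) :
    (((pvSweep edges anc).1 ++ edges.map (·.1)).toFinset \
        (pvSweep edges anc).1.toFinset).card
    < ((anc ++ edges.map (·.1)).toFinset \ anc.toFinset).card := by
  simp only [pvSweep] at h ⊢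
  rcases pvSweep_grow edges (anc, false) with ⟨h1, h2, h3⟩
  obtain ⟨w, hw1, hw2⟩ := h3 rfl h
  have hU : ((edges.foldl pvAncF (anc, false)).1 ++ edges.map (·.1)).toFinset
      = (anc ++ edges.map (·.1)).toFinset := by
    ext z
    simp only [List.mem_toFinset, List.mem_append]
    constructor
    · rintro (hz | hz)
      · exact h2 z hz
      · exact Or.inr hz
    · rintro (hz | hz)
      · exact Or.inl (h1 z hz)
      · exact Or.inr hz
  rw [hU]
  have hsub : anc.toFinset ⊆ (edges.foldl pvAncF (anc, false)).1.toFinset := by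
    intro z hz
    rw [List.mem_toFinset] at hz ⊢
    exact h1 z hz
  apply Finset.card_lt_card
  rw [Finset.ssubset_iff_of_subset (Finset.sdiff_subset_sdiff (Finset.Subset.refl _) hsub)]
  refine ⟨w, ?_, ?_⟩
  · rw [Finset.mem_sdiff, List.mem_toFinset, List.mem_toFinset, List.mem_append]
    rcases h2 w hw1 with h' | h'
    · exact absurd h' hw2
    · exact ⟨Or.inr h', hw2⟩
  · rw [Finset.mem_sdiff]
    push Not
    intro _
    rw [List.mem_toFinset]
    exact hw1

-- while changed: changed = False; one sweep over the edges; repeat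
def pvAncLoop (edges : List (Int × Int)) (anc : PySem.Set Int) : PySem.Set Int :=
  if h : (pvSweep edges anc).2 = true then pvAncLoop edges (pvSweep edges anc).1
  else (pvSweep edges anc).1
termination_by ((anc ++ edges.map (·.1)).toFinset \ anc.toFinset).card
decreasing_by
  exact pvSweep_dec edges anc h

-- ancestors(root): anc = {root}; sweep until no change
def pvAncestors (edges : List (Int × Int)) (root : Int) : PySem.Set Int :=
  pvAncLoop edges [root]

def parent2_alt (edges : List (Int × Int)) (s : Int) (e : Int) : Bool :=
  !(PySem.Set.isdisjoint (pvAncestors edges s) (pvAncestors edges e))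

-- ===== PRECONDITION & SPEC =====
def Spec_parent2 (edges : List (Int × Int)) (s : Int) (e : Int) (out : Bool) : Prop := out = parent2_alt edges s e
instance (edges : List (Int × Int)) (s : Int) (e : Int) (out : Bool) : Decidable (Spec_parent2 edges s e out) := by unfold Spec_parent2; infer_instance

-- ===== CLAIM (what is proved, stated in full; the proofs are below) =====
def Claim_equal_parent2 : Prop := ∀ (edges : List (Int × Int)) (s : Int) (e : Int), Dom_parent2 edges s e → Spec_parent2 edges s e (parent2 edges s e)

-- ===== LEMMAS AND PROOFS =====

-- x is an ancestor of r (including r itself): reflexive-transitive closure of "has a parent"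
def pvReach (edges : List (Int × Int)) (r x : Int) : Prop :=
  Relation.ReflTransGen (fun a b => (b, a) ∈ edges) r x

lemma pvBuildG_go : ∀ (l : List (Int × Int)) (g0 : PySem.Dict Int (PySem.Set Int)) (u v : Int),
    u ∈ PySem.Dict.getD
        (l.foldl (fun g uv => g.insert uv.2 (PySem.Set.add (g.getD uv.2 PySem.Set.empty) uv.1)) g0)
        v PySem.Set.empty
      ↔ u ∈ PySem.Dict.getD g0 v PySem.Set.empty ∨ (u, v) ∈ l := by
  intro l
  induction l with
  | nil => simp
  | cons uv t ih =>
      intro g0 u v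
      simp only [List.foldl_cons, List.mem_cons]
      rw [ih, PySem.Dict.getD_insert]
      by_cases hv : v = uv.2
      · subst hv
        rw [if_pos rfl, PySem.Set.mem_add]
        constructor
        · rintro (⟨h | h⟩ | h)
          · exact Or.inl h
          · exact Or.inr (Or.inl (by rw [h]))
          · exact Or.inr (Or.inr h)
        · rintro (h | h | h)
          · exact Or.inl (Or.inl h)
          · exact Or.inl (Or.inr (by rw [← h]))
          · exact Or.inr h
      · rw [if_neg hv]
        have hne : (u, v) ≠ uv := by
          intro hh
          exact hv (by rw [← hh])
        constructor
        · rintro (h | h)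
          · exact Or.inl h
          · exact Or.inr (Or.inr h)
        · rintro (h | h | h)
          · exact Or.inl h
          · exact absurd h hne
          · exact Or.inr h

lemma pvBuildG_mem (edges : List (Int × Int)) (u v : Int) :
    u ∈ PySem.Dict.getD (pvBuildG edges) v PySem.Set.empty ↔ (u, v) ∈ edges := by
  have h := pvBuildG_go edges PySem.Dict.empty u v
  simpa [pvBuildG, PySem.Dict.getD_empty, PySem.Set.empty] using h

lemma pvBfs_mono (g : PySem.Dict Int (PySem.Set Int)) :
    ∀ (s1 : PySem.Set Int) (q : List Int) (x : Int),
      x ∈ s1 ∨ x ∈ q → x ∈ pvBfs g s1 q := by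
  intro s1 q
  fun_induction pvBfs g s1 q with
  | case1 s1 =>
      intro x hx
      rcases hx with hx | hx
      · exact hx
      · cases hx
  | case2 s1 cur rest ih =>
      intro x hx
      apply ih
      rcases hx with hx | hx
      · exact Or.inl ((PySem.Set.mem_add _ _ _).mpr (Or.inl hx))
      · rcases List.mem_cons.mp hx with hx | hx
        · exact Or.inl ((PySem.Set.mem_add _ _ _).mpr (Or.inr hx))
        · exact Or.inr (List.mem_append.mpr (Or.inl hx))

lemma pvBfs_closed (g : PySem.Dict Int (PySem.Set Int)) :
    ∀ (s1 : PySem.Set Int) (q : List Int),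
      (∀ x ∈ s1, ∀ p ∈ PySem.Dict.getD g x PySem.Set.empty, p ∈ s1 ∨ p ∈ q) →
      ∀ x ∈ pvBfs g s1 q, ∀ p ∈ PySem.Dict.getD g x PySem.Set.empty, p ∈ pvBfs g s1 q := by
  intro s1 q
  fun_induction pvBfs g s1 q with
  | case1 s1 =>
      intro hinv x hx p hp
      rcases hinv x hx p hp with h | h
      · exact h
      · cases h
  | case2 s1 cur rest ih =>
      intro hinv
      apply ih
      intro x hx p hp
      rcases (PySem.Set.mem_add _ _ _).mp hx with hx | hx
      · rcases hinv x hx p hp with h | h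
        · exact Or.inl ((PySem.Set.mem_add _ _ _).mpr (Or.inl h))
        · rcases List.mem_cons.mp h with h | h
          · exact Or.inl ((PySem.Set.mem_add _ _ _).mpr (Or.inr h))
          · exact Or.inr (List.mem_append.mpr (Or.inl h))
      · rw [hx] at hp
        by_cases hps : p ∈ PySem.Set.add s1 cur
        · exact Or.inl hps
        · refine Or.inr (List.mem_append.mpr (Or.inr ?_))
          rw [List.mem_filter]
          refine ⟨hp, ?_⟩
          cases hcc : PySem.Set.contains (PySem.Set.add s1 cur) p with
          | false => rfl
          | true => exact absurd ((PySem.Set.contains_iff _ _).mp hcc) hps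

lemma pvBfs_sound (g : PySem.Dict Int (PySem.Set Int)) (P : Int → Prop)
    (hstep : ∀ x p, p ∈ PySem.Dict.getD g x PySem.Set.empty → P x → P p) :
    ∀ (s1 : PySem.Set Int) (q : List Int),
      (∀ x ∈ s1, P x) → (∀ x ∈ q, P x) → ∀ x ∈ pvBfs g s1 q, P x := by
  intro s1 q
  fun_induction pvBfs g s1 q with
  | case1 s1 =>
      intro h1 _ x hx
      exact h1 x hx
  | case2 s1 cur rest ih =>
      intro h1 h2
      apply ih
      · intro x hx
        rcases (PySem.Set.mem_add _ _ _).mp hx with hx | hx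
        · exact h1 x hx
        · rw [hx]
          exact h2 cur (by simp)
      · intro x hx
        rcases List.mem_append.mp hx with hx | hx
        · exact h2 x (List.mem_cons_of_mem _ hx)
        · have hf := List.mem_filter.mp hx
          exact hstep cur x hf.1 (h2 cur (by simp))

lemma pvBfs_mem (edges : List (Int × Int)) (r x : Int) :
    x ∈ pvBfs (pvBuildG edges) PySem.Set.empty [r] ↔ pvReach edges r x := by
  constructor
  · intro hx
    refine pvBfs_sound (pvBuildG edges) (pvReach edges r) ?_ PySem.Set.empty [r] ?_ ?_ x hx
    · intro a p hp ha
      exact Relation.ReflTransGen.tail ha ((pvBuildG_mem edges p a).mp hp)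
    · intro y hy
      simp [PySem.Set.empty] at hy
    · intro y hy
      obtain rfl := List.mem_singleton.mp hy
      exact Relation.ReflTransGen.refl
  · intro hr
    induction hr with
    | refl =>
        exact pvBfs_mono (pvBuildG edges) PySem.Set.empty [r] r
          (Or.inr (by simp))
    | tail hrb hbc ih =>
        exact pvBfs_closed (pvBuildG edges) PySem.Set.empty [r]
          (by intro y hy; simp [PySem.Set.empty] at hy) _ ih _
          ((pvBuildG_mem edges _ _).mpr hbc)

lemma pvSweep_flag_mono : ∀ (l : List (Int × Int)) (p : PySem.Set Int × Bool),
    p.2 = true → (l.foldl pvAncF p).2 = true := by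
  intro l
  induction l with
  | nil =>
      intro p h
      simpa using h
  | cons uv t ih =>
      intro p h
      simp only [List.foldl_cons]
      apply ih
      by_cases hc : (PySem.Set.contains p.1 uv.2 && !(PySem.Set.contains p.1 uv.1)) = true
      · simp only [pvAncF]; rw [if_pos hc]
      · simp only [pvAncF]; rw [if_neg hc]; exact h

lemma pvSweep_fix : ∀ (l : List (Int × Int)) (p : PySem.Set Int × Bool),
    (l.foldl pvAncF p).2 = false →
    (l.foldl pvAncF p).1 = p.1 ∧ ∀ uv ∈ l, uv.2 ∈ p.1 → uv.1 ∈ p.1 := by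
  intro l
  induction l with
  | nil =>
      intro p _
      exact ⟨rfl, by intro uv huv; cases huv⟩
  | cons uv t ih =>
      intro p h
      simp only [List.foldl_cons] at h ⊢
      by_cases hc : (PySem.Set.contains p.1 uv.2 && !(PySem.Set.contains p.1 uv.1)) = true
      · exfalso
        have h2 : (pvAncF p uv).2 = true := by
          simp only [pvAncF]; rw [if_pos hc]
        have h3 := pvSweep_flag_mono t (pvAncF p uv) h2
        rw [h3] at h
        cases h
      · have hq : pvAncF p uv = p := by
          simp only [pvAncF]; rw [if_neg hc]
        rw [hq] at h ⊢
        rcases ih p h with ⟨h1, h2⟩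
        refine ⟨h1, ?_⟩
        intro w hw hwv
        rcases List.mem_cons.mp hw with hw | hw
        · rw [hw] at hwv ⊢
          by_contra hnu
          apply hc
          rw [Bool.and_eq_true, Bool.not_eq_true']
          refine ⟨(PySem.Set.contains_iff _ _).mpr hwv, ?_⟩
          cases hcc : PySem.Set.contains p.1 uv.1 with
          | false => rfl
          | true => exact absurd ((PySem.Set.contains_iff _ _).mp hcc) hnu
        · exact h2 w hw hwv

lemma pvSweep_sound (P : Int → Prop) : ∀ (l : List (Int × Int)),
    (∀ u v, (u, v) ∈ l → P v → P u) →
    ∀ p : PySem.Set Int × Bool, (∀ x ∈ p.1, P x) → ∀ x ∈ (l.foldl pvAncF p).1, P x := by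
  intro l
  induction l with
  | nil =>
      intro _ p hp x hx
      exact hp x hx
  | cons uv t ih =>
      intro hstep p hp
      simp only [List.foldl_cons]
      apply ih (fun u v huv => hstep u v (List.mem_cons_of_mem _ huv))
      intro x hx
      by_cases hc : (PySem.Set.contains p.1 uv.2 && !(PySem.Set.contains p.1 uv.1)) = true
      · have hq : pvAncF p uv = (PySem.Set.add p.1 uv.1, true) := by
          simp only [pvAncF]; rw [if_pos hc]
        rw [hq] at hx
        rcases (PySem.Set.mem_add _ _ _).mp hx with hx | hx
        · exact hp x hx
        · rw [hx]
          have hc2 := hc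
          rw [Bool.and_eq_true] at hc2
          exact hstep uv.1 uv.2 (by simp) (hp uv.2 ((PySem.Set.contains_iff _ _).mp hc2.1))
      · have hq : pvAncF p uv = p := by
          simp only [pvAncF]; rw [if_neg hc]
        rw [hq] at hx
        exact hp x hx

lemma pvAncLoop_mono (edges : List (Int × Int)) :
    ∀ (anc : PySem.Set Int) (x : Int), x ∈ anc → x ∈ pvAncLoop edges anc := by
  intro anc
  fun_induction pvAncLoop edges anc with
  | case1 anc h ih =>
      intro x hx
      exact ih x ((pvSweep_grow edges (anc, false)).1 x hx)
  | case2 anc h =>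
      intro x hx
      exact (pvSweep_grow edges (anc, false)).1 x hx

lemma pvAncLoop_closed (edges : List (Int × Int)) :
    ∀ (anc : PySem.Set Int), ∀ uv ∈ edges,
      uv.2 ∈ pvAncLoop edges anc → uv.1 ∈ pvAncLoop edges anc := by
  intro anc
  fun_induction pvAncLoop edges anc with
  | case1 anc h ih => exact ih
  | case2 anc h =>
      intro uv huv h2
      have hf : (pvSweep edges anc).2 = false := Bool.eq_false_iff.mpr h
      rcases pvSweep_fix edges (anc, false) hf with ⟨h1, hcl⟩
      simp only [pvSweep] at h2 ⊢
      rw [h1] at h2 ⊢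
      exact hcl uv huv h2

lemma pvAncLoop_sound (edges : List (Int × Int)) (P : Int → Prop)
    (hstep : ∀ u v, (u, v) ∈ edges → P v → P u) :
    ∀ (anc : PySem.Set Int), (∀ x ∈ anc, P x) → ∀ x ∈ pvAncLoop edges anc, P x := by
  intro anc
  fun_induction pvAncLoop edges anc with
  | case1 anc h ih =>
      intro hp
      exact ih (pvSweep_sound P edges hstep (anc, false) hp)
  | case2 anc h =>
      intro hp
      exact pvSweep_sound P edges hstep (anc, false) hp

lemma pvAncestors_mem (edges : List (Int × Int)) (r x : Int) :
    x ∈ pvAncestors edges r ↔ pvReach edges r x := by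
  constructor
  · intro hx
    refine pvAncLoop_sound edges (pvReach edges r)
      (fun u v huv hv => Relation.ReflTransGen.tail hv huv) [r] ?_ x hx
    intro y hy
    obtain rfl := List.mem_singleton.mp hy
    exact Relation.ReflTransGen.refl
  · intro hr
    induction hr with
    | refl => exact pvAncLoop_mono edges [r] r (by simp)
    | tail hrb hbc ih =>
        exact pvAncLoop_closed edges [r] _ hbc ih

lemma parent2_true_iff (edges : List (Int × Int)) (s e : Int) :
    parent2 edges s e = true ↔ ∃ x, pvReach edges s x ∧ pvReach edges e x := by
  simp only [parent2, bne_iff_ne, ne_eq]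
  constructor
  · intro hlen
    cases hI : PySem.Set.inter (pvBfs (pvBuildG edges) PySem.Set.empty [s])
        (pvBfs (pvBuildG edges) PySem.Set.empty [e]) with
    | nil =>
        rw [hI] at hlen
        exact absurd rfl hlen
    | cons a t =>
        have ha : a ∈ PySem.Set.inter (pvBfs (pvBuildG edges) PySem.Set.empty [s])
            (pvBfs (pvBuildG edges) PySem.Set.empty [e]) := by
          rw [hI]; simp
        have hm := (PySem.Set.mem_inter _ _ _).mp ha
        exact ⟨a, (pvBfs_mem edges s a).mp hm.1, (pvBfs_mem edges e a).mp hm.2⟩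
  · rintro ⟨x, hxs, hxe⟩
    have hx : x ∈ PySem.Set.inter (pvBfs (pvBuildG edges) PySem.Set.empty [s])
        (pvBfs (pvBuildG edges) PySem.Set.empty [e]) :=
      (PySem.Set.mem_inter _ _ _).mpr ⟨(pvBfs_mem edges s x).mpr hxs, (pvBfs_mem edges e x).mpr hxe⟩
    intro h0
    cases hI : PySem.Set.inter (pvBfs (pvBuildG edges) PySem.Set.empty [s])
        (pvBfs (pvBuildG edges) PySem.Set.empty [e]) with
    | nil =>
        rw [hI] at hx
        cases hx
    | cons a t =>
        rw [hI] at h0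
        simp [PySem.Set.len] at h0
        omega

lemma parent2_alt_true_iff (edges : List (Int × Int)) (s e : Int) :
    parent2_alt edges s e = true ↔ ∃ x, pvReach edges s x ∧ pvReach edges e x := by
  simp only [parent2_alt, Bool.not_eq_true']
  constructor
  · intro hd
    by_contra hne
    push Not at hne
    have ht : PySem.Set.isdisjoint (pvAncestors edges s) (pvAncestors edges e) = true := by
      rw [PySem.Set.isdisjoint_iff]
      intro x hx hx2
      exact hne x ((pvAncestors_mem edges s x).mp hx) ((pvAncestors_mem edges e x).mp hx2)
    rw [ht] at hd
    cases hd
  · rintro ⟨x, hxs, hxe⟩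
    cases hd : PySem.Set.isdisjoint (pvAncestors edges s) (pvAncestors edges e) with
    | false => rfl
    | true =>
        have := (PySem.Set.isdisjoint_iff _ _).mp hd x ((pvAncestors_mem edges s x).mpr hxs)
        exact absurd ((pvAncestors_mem edges e x).mpr hxe) this

-- ===== VERDICT (by name: the statement is the Claim_ definition above) =====
theorem parent2_spec : Claim_equal_parent2 := by
  intro edges s e _
  unfold Spec_parent2
  rw [Bool.eq_iff_iff, parent2_true_iff, parent2_alt_true_iff]
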